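-- pv_equiv track=rewrite | github.com/ursa-mikail/data_format | cvs_and_markdown/cvs_to_and_from_markdown_table.py | merge_token_table_to_markdown
-- ===== SOURCE A (Python) =====
-- def merge_token_table_to_markdown(grid):
--     markdown = []
--     num_cols = max(len(row) for row in grid)
--
--     def is_merge(cell): return cell in ["[^^^]", "[>>>]"]
--
--     col_widths = [0] * num_cols
--     for r in range(len(grid)):
--         for c in range(len(grid[r])):
--             if not is_merge(grid[r][c]):
--                 col_widths[c] = max(col_widths[c], len(grid[r][c]))
--
--     def format_row(row):
--         return "| " + " | ".join(
--             ("" if is_merge(cell) else cell).ljust(col_widths[i])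
--             for i, cell in enumerate(row)
--         ) + " |"
--
--     markdown.append(format_row(grid[0]))
--     markdown.append("| " + " | ".join("-" * w for w in col_widths) + " |")
--     for row in grid[1:]:
--         markdown.append(format_row(row))
--
--     return "\n".join(markdown)
-- ===== SOURCE B (Python) =====
-- def merge_token_table_to_markdown(grid):
--     BLANK = {"[^^^]": "", "[>>>]": ""}
--
--     # stage 1: erase merge tokens once, so later stages never test for them
--     cleaned = [[BLANK.get(cell, cell) for cell in row] for row in grid]
--
--     # stage 2: fold the rows into a width vector with a recursive pairwise merge
--     def merge_widths(ws, lens):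
--         if not ws:
--             return lens
--         if not lens:
--             return ws
--         return [max(ws[0], lens[0])] + merge_widths(ws[1:], lens[1:])
--
--     widths = []
--     for row in cleaned:
--         widths = merge_widths(widths, [len(cell) for cell in row])
--
--     # stage 3: pad the cells into a table, splice the dash row in AS DATA,
--     # then render the whole table with one uniform join
--     table = [[cell.ljust(w) for cell, w in zip(row, widths)] for row in cleaned]
--     table[1:1] = [["-" * w for w in widths]]
--     return "\n".join("| " + " | ".join(row) + " |" for row in table)
-- ===== Notes on version B (the rewrite author's own statement) =====
-- stated objective: alternative
-- what changed: B is a three-stage pipeline with no index arithmetic: it first erases merge tokens from the whole grid, then folds the rows into a width vector with a recursive pairwise merge of lists (instead of A's nested range-loop mutating a preallocated width array), then pads every cell into a plain table, splices the dash separator in as an ordinary data row, and renders the whole table with one uniform join (instead of A's special-cased header/separator/body rendering with a merge test inside the formatter).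
import Mathlib
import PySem

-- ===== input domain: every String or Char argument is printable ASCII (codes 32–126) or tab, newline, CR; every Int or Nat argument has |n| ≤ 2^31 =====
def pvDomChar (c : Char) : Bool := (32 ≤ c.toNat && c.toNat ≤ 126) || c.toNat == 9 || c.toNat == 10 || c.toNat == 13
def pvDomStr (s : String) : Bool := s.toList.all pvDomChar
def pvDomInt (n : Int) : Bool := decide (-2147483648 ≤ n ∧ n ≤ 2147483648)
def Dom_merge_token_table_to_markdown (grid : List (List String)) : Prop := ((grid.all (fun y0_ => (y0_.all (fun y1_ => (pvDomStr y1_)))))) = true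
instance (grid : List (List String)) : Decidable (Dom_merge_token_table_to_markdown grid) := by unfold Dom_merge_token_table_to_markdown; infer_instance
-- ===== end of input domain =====

-- B replaces A's nested index loop + special-cased header/separator/body rendering by a
-- three-stage pipeline: erase merge tokens once, fold rows into a width vector by a recursive
-- pairwise list merge, pad all cells into a table, splice the dash row in as data and render
-- the whole table with one uniform join (objective: alternative).

-- shared hand port of the builtin str.ljust(w): exact (Nat subtraction = Python's max(0, w-len));
-- cell lengths are kept as Nat since Python's len is never negative here
def pvStrLjust (s : String) (w : Nat) : String :=
  String.ofList (s.toList ++ List.replicate (w - s.toList.length) ' ')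

-- '-' * w, hand port of string repetition (exact)
def pvDashes (w : Nat) : String := String.ofList (List.replicate w '-')

-- ===== PORT A =====
def pvIsMergeA (cell : String) : Bool := ["[^^^]", "[>>>]"].contains cell

-- num_cols = max(len(row) for row in grid); none (Python: ValueError) only for grid = [], outside Pre_
def pvNumColsA (grid : List (List String)) : Nat :=
  match PySem.List.max? (grid.map (fun row => row.length)) (fun n => n) with
  | some n => n
  | none => 0

-- the inner 'for c in range(len(grid[r]))' loop of A's width pass
def pvUpdRowA (ws : List Nat) (row : List String) : List Nat :=
  (List.range row.length).foldl
    (fun ws c =>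
      if pvIsMergeA (row.getD c "") then ws
      else ws.set c (max (ws.getD c 0) (row.getD c "").toList.length)) ws

def pvColWidthsA (grid : List (List String)) : List Nat :=
  grid.foldl pvUpdRowA (List.replicate (pvNumColsA grid) 0)

def pvFormatRowA (ws : List Nat) (row : List String) : String :=
  "| " ++ PySem.Str.join " | "
      ((PySem.List.enumerate row).map
        (fun p => pvStrLjust (if pvIsMergeA p.2 then "" else p.2) (ws.getD p.1.toNat 0)))
    ++ " |"

def merge_token_table_to_markdown (grid : List (List String)) : String :=
  let ws := pvColWidthsA grid
  -- grid[0]: under Pre_ grid ≠ [], so headD's default is never used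
  let markdown := [pvFormatRowA ws (grid.headD [])]
  let markdown := markdown ++ ["| " ++ PySem.Str.join " | " (ws.map pvDashes) ++ " |"]
  let markdown := markdown ++ (grid.drop 1).map (pvFormatRowA ws)
  PySem.Str.join "\n" markdown

-- ===== PORT B =====
-- BLANK = {"[^^^]": "", "[>>>]": ""}; BLANK.get(cell, cell)
def pvBlank (cell : String) : String :=
  PySem.Dict.getD (PySem.Dict.ofList [("[^^^]", ""), ("[>>>]", "")]) cell cell

-- stage 1: cleaned = [[BLANK.get(cell, cell) for cell in row] for row in grid]
def pvClean (grid : List (List String)) : List (List String) :=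
  grid.map (fun row => row.map pvBlank)

-- stage 2: the recursive pairwise merge of two width lists
def pvMergeWidths : List Nat → List Nat → List Nat
  | [], lens => lens
  | w :: ws, [] => w :: ws
  | w :: ws, l :: lens => max w l :: pvMergeWidths ws lens

def pvWidthsB (cleaned : List (List String)) : List Nat :=
  cleaned.foldl (fun ws row => pvMergeWidths ws (row.map (fun c => c.toList.length))) []

-- stage 3: pad, splice the dash row in as data, render uniformly
def pvPadRowB (ws : List Nat) (row : List String) : List String :=
  (row.zip ws).map (fun p => pvStrLjust p.1 p.2)

def pvRenderB (row : List String) : String :=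
  "| " ++ PySem.Str.join " | " row ++ " |"

def merge_token_table_to_markdown_alt (grid : List (List String)) : String :=
  let cleaned := pvClean grid
  let ws := pvWidthsB cleaned
  let table := cleaned.map (pvPadRowB ws)
  -- table[1:1] = [dash row] : splice at index 1
  let table := table.take 1 ++ [ws.map pvDashes] ++ table.drop 1
  PySem.Str.join "\n" (table.map pvRenderB)

-- ===== PRECONDITION & SPEC =====
-- Pre_ excludes only the empty grid, on which A raises ValueError (max() of an empty sequence)
def Pre_merge_token_table_to_markdown (grid : List (List String)) : Prop := grid ≠ []
instance (grid : List (List String)) : Decidable (Pre_merge_token_table_to_markdown grid) := by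
  unfold Pre_merge_token_table_to_markdown; infer_instance

def pvWitness_merge_token_table_to_markdown : List (List String) :=
  [["h1", "header2"], ["[>>>]", "x"], ["abc"]]

def Spec_merge_token_table_to_markdown (grid : List (List String)) (out : String) : Prop :=
  out = merge_token_table_to_markdown_alt grid
instance (grid : List (List String)) (out : String) :
    Decidable (Spec_merge_token_table_to_markdown grid out) := by
  unfold Spec_merge_token_table_to_markdown; infer_instance

-- ===== CLAIM (what is proved, stated in full; the proofs are below) =====
def Claim_equal_merge_token_table_to_markdown : Prop :=
  ∀ (grid : List (List String)), Dom_merge_token_table_to_markdown grid →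
    Pre_merge_token_table_to_markdown grid →
    Spec_merge_token_table_to_markdown grid (merge_token_table_to_markdown grid)

-- ===== LEMMAS AND PROOFS =====

-- the dict lookup in B is exactly A's merge test
theorem pvBlank_eq (cell : String) :
    pvBlank cell = if pvIsMergeA cell then "" else cell := by
  unfold pvBlank pvIsMergeA
  rw [show (PySem.Dict.ofList [("[^^^]", ""), ("[>>>]", "")] : PySem.Dict String String) =
      (PySem.Dict.empty.insert "[^^^]" "").insert "[>>>]" "" from rfl,
    PySem.Dict.getD_insert, PySem.Dict.getD_insert, PySem.Dict.getD_empty]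
  by_cases h1 : cell = "[^^^]" <;> by_cases h2 : cell = "[>>>]" <;>
    simp [h1, h2]

-- the body of A's inner loop, named for the lemmas below
def pvStepA (row : List String) (ws : List Nat) (c : Nat) : List Nat :=
  if pvIsMergeA (row.getD c "") then ws
  else ws.set c (max (ws.getD c 0) (row.getD c "").toList.length)

theorem pvStepA_fold_length (row : List String) (cs : List Nat) (ws : List Nat) :
    (cs.foldl (pvStepA row) ws).length = ws.length := by
  induction cs generalizing ws with
  | nil => rfl
  | cons c cs ih =>
      rw [List.foldl_cons, ih]
      unfold pvStepA; split
      · rfl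
      · exact List.length_set ..

theorem pvUpdRowA_eq_fold (ws : List Nat) (row : List String) :
    pvUpdRowA ws row = (List.range row.length).foldl (pvStepA row) ws := rfl

theorem pvUpdRowA_length (ws : List Nat) (row : List String) :
    (pvUpdRowA ws row).length = ws.length := by
  rw [pvUpdRowA_eq_fold]; exact pvStepA_fold_length ..

-- value of A's inner loop at a column index
theorem pvUpdRowA_getD (ws : List Nat) (row : List String) (c : Nat)
    (hlen : row.length ≤ ws.length) :
    (pvUpdRowA ws row).getD c 0 =
      if c < row.length ∧ pvIsMergeA (row.getD c "") = false
      then max (ws.getD c 0) (row.getD c "").toList.length else ws.getD c 0 := by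
  rw [pvUpdRowA_eq_fold]
  have main : ∀ k : Nat, k ≤ row.length →
      ((List.range k).foldl (pvStepA row) ws).getD c 0 =
        if c < k ∧ pvIsMergeA (row.getD c "") = false
        then max (ws.getD c 0) (row.getD c "").toList.length else ws.getD c 0 := by
    intro k
    induction k with
    | zero => simp
    | succ k ih =>
        intro hk
        rw [List.range_succ, List.foldl_append, List.foldl_cons, List.foldl_nil]
        set L := (List.range k).foldl (pvStepA row) ws with hL
        have hlenk : L.length = ws.length := pvStepA_fold_length ..
        unfold pvStepA
        by_cases hm : pvIsMergeA (row.getD k "") = true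
        · rw [if_pos hm, ih (by omega)]
          by_cases hc : c = k
          · subst hc
            have h1 : ¬ (c < c ∧ pvIsMergeA (row.getD c "") = false) := by
              rintro ⟨h, _⟩; omega
            have h2 : ¬ (c < c + 1 ∧ pvIsMergeA (row.getD c "") = false) := by
              rintro ⟨_, h⟩; rw [hm] at h; cases h
            rw [if_neg h1, if_neg h2]
          · have hiff : (c < k ∧ pvIsMergeA (row.getD c "") = false) ↔
                (c < k + 1 ∧ pvIsMergeA (row.getD c "") = false) :=
              and_congr_left' (by omega)
            simp only [hiff]
        · rw [if_neg hm]
          have hgd : ∀ (l : List Nat) (v : Nat), l.length = ws.length →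
              (l.set k v).getD c 0 = if c = k then v else l.getD c 0 := by
            intro l v hl
            by_cases hc : c = k
            · subst hc
              have hcl : c < l.length := by omega
              simp [List.getD, hcl]
            · simp [List.getD, Ne.symm hc, hc]
          rw [hgd _ _ hlenk]
          by_cases hc : c = k
          · subst hc
            rw [if_pos rfl, ih (by omega)]
            have h1 : ¬ (c < c ∧ pvIsMergeA (row.getD c "") = false) := by
              rintro ⟨h, _⟩; omega
            have h2 : c < c + 1 ∧ pvIsMergeA (row.getD c "") = false :=
              ⟨by omega, by revert hm; cases pvIsMergeA (row.getD c "") <;> simp⟩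
            rw [if_neg h1, if_pos h2]
          · rw [if_neg hc, ih (by omega)]
            have hiff : (c < k ∧ pvIsMergeA (row.getD c "") = false) ↔
                (c < k + 1 ∧ pvIsMergeA (row.getD c "") = false) :=
              and_congr_left' (by omega)
            simp only [hiff]
  exact main row.length le_rfl

-- A's whole width pass at a column index is a plain fold over the rows
theorem pvColWidthsA_fold (grid : List (List String)) (ws : List Nat) (c : Nat)
    (h : ∀ row ∈ grid, row.length ≤ ws.length) :
    (grid.foldl pvUpdRowA ws).getD c 0 =
      grid.foldl
        (fun m row =>
          if c < row.length ∧ pvIsMergeA (row.getD c "") = false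
          then max m (row.getD c "").toList.length else m)
        (ws.getD c 0) := by
  induction grid generalizing ws with
  | nil => rfl
  | cons r rs ih =>
      rw [List.foldl_cons, List.foldl_cons,
        ih _ (fun row hr => by
          rw [pvUpdRowA_length]; exact h row (List.mem_cons_of_mem _ hr)),
        pvUpdRowA_getD ws r c (h r List.mem_cons_self)]

theorem pvFoldRows_length (grid : List (List String)) (ws : List Nat) :
    (grid.foldl pvUpdRowA ws).length = ws.length := by
  induction grid generalizing ws with
  | nil => rfl
  | cons r rs ih => simp [List.foldl_cons, ih, pvUpdRowA_length]

-- max() of a nonempty list never fails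
theorem pvMax?_cons_ne_none (x : Nat) (xs : List Nat) :
    PySem.List.max? (x :: xs) (fun n => n) ≠ none := by
  rw [PySem.List.max?_id_cons]; simp

-- every row is at most num_cols wide
theorem pvRow_le_numCols (grid : List (List String)) (row : List String) (hr : row ∈ grid) :
    row.length ≤ pvNumColsA grid := by
  unfold pvNumColsA
  cases hm : PySem.List.max? (grid.map (fun row => row.length)) (fun n => n) with
  | some n =>
      exact PySem.List.max?_isMax hm _ (List.mem_map_of_mem hr)
  | none =>
      exfalso
      cases grid with
      | nil => cases hr
      | cons g gs =>
          rw [List.map_cons] at hm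
          exact pvMax?_cons_ne_none _ _ hm

-- num_cols is the running max of the row lengths
theorem pvNumColsA_cons (g : List String) (gs : List (List String)) :
    pvNumColsA (g :: gs) = (gs.map List.length).foldl max g.length := by
  unfold pvNumColsA
  rw [List.map_cons, PySem.List.max?_id_cons]

-- B's pairwise merge: length and pointwise value
theorem pvMergeWidths_length (ws lens : List Nat) :
    (pvMergeWidths ws lens).length = max ws.length lens.length := by
  induction ws generalizing lens with
  | nil => simp [pvMergeWidths]
  | cons w ws ih =>
      cases lens with
      | nil => simp [pvMergeWidths]
      | cons l lens =>
          simp only [pvMergeWidths, List.length_cons, ih]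
          omega

theorem pvMergeWidths_getD (ws lens : List Nat) (c : Nat) :
    (pvMergeWidths ws lens).getD c 0 = max (ws.getD c 0) (lens.getD c 0) := by
  induction ws generalizing lens c with
  | nil => simp [pvMergeWidths]
  | cons w ws ih =>
      cases lens with
      | nil => simp [pvMergeWidths]
      | cons l lens =>
          cases c with
          | zero => simp [pvMergeWidths]
          | succ c => simpa [pvMergeWidths] using ih lens c

-- the length vector of a cleaned row, at a column index
theorem pvCleanLens_getD (row : List String) (c : Nat) :
    ((row.map pvBlank).map (fun s => s.toList.length)).getD c 0 =
      if c < row.length ∧ pvIsMergeA (row.getD c "") = false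
      then (row.getD c "").toList.length else 0 := by
  by_cases hc : c < row.length
  · have hcl : c < ((row.map pvBlank).map (fun s => s.toList.length)).length := by
      simpa using hc
    rw [List.getD_eq_getElem _ _ hcl, List.getElem_map, List.getElem_map,
      List.getD_eq_getElem _ _ hc, pvBlank_eq]
    by_cases hm : pvIsMergeA row[c] = true
    · rw [if_pos hm, if_neg (by rintro ⟨_, h⟩; rw [hm] at h; cases h)]; rfl
    · rw [if_neg hm, if_pos ⟨hc, by simpa using hm⟩]
  · rw [List.getD_eq_default _ _ (by simpa using hc),
      if_neg (by rintro ⟨h, _⟩; exact hc h)]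

-- B's whole width fold at a column index equals A's fold over the rows
theorem pvWidthsB_fold (grid : List (List String)) (ws : List Nat) (c : Nat) :
    ((pvClean grid).foldl
        (fun ws row => pvMergeWidths ws (row.map (fun s => s.toList.length))) ws).getD c 0 =
      grid.foldl
        (fun m row =>
          if c < row.length ∧ pvIsMergeA (row.getD c "") = false
          then max m (row.getD c "").toList.length else m)
        (ws.getD c 0) := by
  induction grid generalizing ws with
  | nil => rfl
  | cons r rs ih =>
      rw [pvClean, List.map_cons, List.foldl_cons, List.foldl_cons, ← pvClean, ih,
        pvMergeWidths_getD, pvCleanLens_getD]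
      split
      · rfl
      · rw [Nat.max_zero]

-- B's width vector has length num_cols
theorem pvWidthsB_length (grid : List (List String)) :
    (pvWidthsB (pvClean grid)).length = pvNumColsA grid := by
  cases grid with
  | nil => rfl
  | cons g gs =>
      rw [pvNumColsA_cons]
      have main : ∀ (rs : List (List String)) (ws : List Nat),
          ((pvClean rs).foldl
              (fun ws row => pvMergeWidths ws (row.map (fun s => s.toList.length))) ws).length =
            (rs.map List.length).foldl max ws.length := by
        intro rs
        induction rs with
        | nil => intro ws; rfl
        | cons r rs ih =>
            intro ws
            rw [pvClean, List.map_cons, List.foldl_cons, ← pvClean, ih,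
              List.map_cons, List.foldl_cons, pvMergeWidths_length]
            simp
      unfold pvWidthsB
      rw [main (g :: gs) [], List.map_cons, List.foldl_cons]
      simp

-- the two width vectors coincide
theorem pvWidths_eq (grid : List (List String)) :
    pvColWidthsA grid = pvWidthsB (pvClean grid) := by
  have hlenA : (pvColWidthsA grid).length = pvNumColsA grid := by
    unfold pvColWidthsA; rw [pvFoldRows_length, List.length_replicate]
  apply List.ext_getElem (by rw [hlenA, pvWidthsB_length])
  intro c h1 h2
  rw [← List.getD_eq_getElem _ 0 h1, ← List.getD_eq_getElem _ 0 h2]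
  have hc : c < pvNumColsA grid := hlenA ▸ h1
  unfold pvColWidthsA
  rw [pvColWidthsA_fold _ _ _ (fun row hr => by
      rw [List.length_replicate]; exact pvRow_le_numCols _ _ hr)]
  have hrep : (List.replicate (pvNumColsA grid) (0 : Nat)).getD c 0 = 0 := by
    rw [List.getD_eq_getElem _ 0 (by rw [List.length_replicate]; exact hc)]
    exact List.getElem_replicate _
  rw [hrep]
  unfold pvWidthsB
  rw [pvWidthsB_fold]
  rfl

-- A's enumerate-indexed rendering of a row = B's padded cleaned row, for long-enough widths
theorem pvRow_render_eq (row : List String) (ws : List Nat) (hlen : row.length ≤ ws.length) :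
    ((PySem.List.enumerate row).map
        (fun p => pvStrLjust (if pvIsMergeA p.2 then "" else p.2) (ws.getD p.1.toNat 0))) =
      pvPadRowB ws (row.map pvBlank) := by
  unfold pvPadRowB
  have main : ∀ (row : List String) (s : Nat) (ws : List Nat), s + row.length ≤ ws.length →
      (PySem.List.enumerate row (s : Int)).map
          (fun p => pvStrLjust (if pvIsMergeA p.2 then "" else p.2) (ws.getD p.1.toNat 0)) =
        ((row.map pvBlank).zip (ws.drop s)).map (fun p => pvStrLjust p.1 p.2) := by
    intro row
    induction row with
    | nil => intro s ws h; rfl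
    | cons x xs ih =>
        intro s ws h
        rw [PySem.List.enumerate_cons, List.map_cons, List.map_cons]
        have hs : s < ws.length := by simp only [List.length_cons] at h; omega
        rw [List.drop_eq_getElem_cons hs, List.zip_cons_cons, List.map_cons]
        congr 1
        · rw [show ((s : Int)).toNat = s from Int.toNat_natCast s,
            List.getD_eq_getElem _ _ hs, pvBlank_eq]
        · rw [show ((s : Int) + 1) = (((s + 1 : Nat)) : Int) by push_cast; ring,
            ih (s + 1) ws (by simp only [List.length_cons] at h; omega)]
  have h0 := main row 0 ws (by omega)
  rw [List.drop_zero] at h0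
  exact h0

theorem pvFormatRow_eq (row : List String) (ws : List Nat) (hlen : row.length ≤ ws.length) :
    pvFormatRowA ws row = pvRenderB (pvPadRowB ws (row.map pvBlank)) := by
  unfold pvFormatRowA pvRenderB
  rw [pvRow_render_eq row ws hlen]

-- ===== VERDICT (by name: the statement is the Claim_ definition above) =====
theorem merge_token_table_to_markdown_spec : Claim_equal_merge_token_table_to_markdown := by
  intro grid _ hpre
  unfold Spec_merge_token_table_to_markdown
  obtain ⟨g, gs, rfl⟩ : ∃ g gs, grid = g :: gs := by
    cases grid with
    | nil => exact absurd rfl hpre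
    | cons g gs => exact ⟨g, gs, rfl⟩
  have hws : ∀ r ∈ g :: gs, r.length ≤ (pvWidthsB (pvClean (g :: gs))).length := by
    intro r hr
    rw [pvWidthsB_length]
    exact pvRow_le_numCols _ _ hr
  simp only [merge_token_table_to_markdown, merge_token_table_to_markdown_alt, pvWidths_eq,
    List.headD_cons]
  rw [show pvClean (g :: gs) = g.map pvBlank :: pvClean gs from rfl] at hws ⊢
  simp only [List.map_cons,
    show ∀ (a : List String) (l : List (List String)), List.take 1 (a :: l) = [a]
      from fun a l => rfl,
    show ∀ (a : List String) (l : List (List String)), List.drop 1 (a :: l) = l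
      from fun a l => rfl,
    List.map_append, List.map_nil]
  rw [pvFormatRow_eq g _ (hws g List.mem_cons_self),
    show pvClean gs = gs.map (fun r => r.map pvBlank) from rfl,
    List.map_map, List.map_map]
  have htail : ∀ r ∈ gs,
      pvFormatRowA
          (pvWidthsB (List.map pvBlank g :: List.map (fun r => List.map pvBlank r) gs)) r
        = ((pvRenderB ∘
              pvPadRowB
                (pvWidthsB (List.map pvBlank g :: List.map (fun r => List.map pvBlank r) gs))) ∘
            fun r => List.map pvBlank r) r :=
    fun r hr => pvFormatRow_eq r _ (hws r (List.mem_cons_of_mem _ hr))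
  rw [List.map_congr_left htail]
  rfl
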